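-- pv_equiv track=rewrite | github.com/gaufqwi/adventofcode | 2021/advent3.py | filterdata_ox
-- ===== SOURCE A (Python) =====
-- def filterdata_ox(data, pos):
--     onecount = 0
--     for n in data:
--         if n[pos] == '1':
--             onecount += 1
--     zerocount = len(data) - onecount
--     ox = []
--     for n in data:
--         if (onecount >= zerocount and n[pos] == '1') or (onecount < zerocount and n[pos] == '0'):
--             ox.append(n)
--     if len(ox) == 1:
--         return int(ox[0], 2)
--     else:
--         return filterdata_ox(ox, pos + 1)
-- ===== SOURCE B (Python) =====
-- def filterdata_ox(data, pos):
--     cur, p = data, pos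
--     while len(cur) != 1:
--         onecount = sum(n[p] == '1' for n in cur)
--         keep = '1' if 2 * onecount >= len(cur) else '0'
--         cur = [n for n in cur if n[p] == keep]
--         p += 1
--     return int(cur[0], 2)
-- ===== Notes on version B (the rewrite author's own statement) =====
-- stated objective: simpler
-- what changed: Replaces A's tail recursion and its count-then-rebuild with two symmetric branch conditions by an iterative while-loop that computes the single majority bit ('1' iff 2*onecount >= len) once and keeps it with one comprehension, checking for the singleton before filtering instead of after.
import Mathlib
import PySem

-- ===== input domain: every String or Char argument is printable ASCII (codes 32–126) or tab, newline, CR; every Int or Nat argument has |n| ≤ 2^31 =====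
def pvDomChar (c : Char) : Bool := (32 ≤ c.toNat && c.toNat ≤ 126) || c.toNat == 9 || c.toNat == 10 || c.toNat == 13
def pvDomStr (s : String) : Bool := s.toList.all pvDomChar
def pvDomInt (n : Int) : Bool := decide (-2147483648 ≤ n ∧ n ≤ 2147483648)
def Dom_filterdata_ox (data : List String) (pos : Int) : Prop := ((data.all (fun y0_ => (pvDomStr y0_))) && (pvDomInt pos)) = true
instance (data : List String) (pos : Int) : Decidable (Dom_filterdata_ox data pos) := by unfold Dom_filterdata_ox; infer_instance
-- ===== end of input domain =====

-- B replaces A's tail recursion (count ones, rebuild via two symmetric branch conditions,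
-- recurse) by an iterative while-loop that computes the majority bit once and filters on
-- it, checking for the singleton before filtering; objective: simpler.

-- ===== PORT A =====
-- Python's recursion carries no fuel; the fuel argument only makes the Lean recursion
-- total (one unit per recursive call; exhaustion returns 0, reachable only where the
-- Python recursion never returns). int(s, 2) is ported as PySem.Int.ofStrBase? s 2;
-- none = ValueError, an input on which the Python raises.
def filterdata_ox_rec : Nat → List String → Int → Int
  | 0, _, _ => 0
  | fuel + 1, data, pos =>
    let onecount : Int := data.foldl (fun acc n => if PySem.Str.pyGet? n pos == some '1' then acc + 1 else acc) 0
    let zerocount : Int := (data.length : Int) - onecount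
    let ox : List String := data.foldl (fun acc n =>
        if (decide (onecount ≥ zerocount) && PySem.Str.pyGet? n pos == some '1')
            || (decide (onecount < zerocount) && PySem.Str.pyGet? n pos == some '0')
        then acc ++ [n] else acc) []
    if ox.length == 1 then (PySem.Int.ofStrBase? (ox.headD "") 2).getD 0
    else filterdata_ox_rec fuel ox (pos + 1)

-- Fuel bound: every position the Python process touches before returning lies in
-- [pos, max string length), so max length + |pos| + 1 calls always suffice.
def filterdata_ox (data : List String) (pos : Int) : Int :=
  filterdata_ox_rec ((data.map (fun s => s.toList.length)).foldl max 0 + pos.natAbs + 1) data pos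

-- ===== PORT B =====
-- Same fuel device for the while-loop (B checks before filtering, so it needs one more
-- iteration than A's recursion; on [] the Python loop never exits and fuel returns 0).
def filterdata_ox_alt_loop : Nat → List String → Int → Int
  | 0, _, _ => 0
  | fuel + 1, cur, p =>
    if cur.length == 1 then (PySem.Int.ofStrBase? (cur.headD "") 2).getD 0
    else
      let onecount : Int := (cur.countP (fun n => PySem.Str.pyGet? n p == some '1') : Nat)
      let keep : Char := if 2 * onecount ≥ (cur.length : Int) then '1' else '0'
      filterdata_ox_alt_loop fuel (cur.filter (fun n => PySem.Str.pyGet? n p == some keep)) (p + 1)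

def filterdata_ox_alt (data : List String) (pos : Int) : Int :=
  filterdata_ox_alt_loop ((data.map (fun s => s.toList.length)).foldl max 0 + pos.natAbs + 2) data pos

-- ===== PRECONDITION & SPEC =====
-- Certificate vocabulary for Pre_: after i filtering steps starting at pos the survivors
-- are exactly the strings agreeing with the eventual winner w on positions pos..pos+i-1,
-- and the kept (majority/tie) bit of a set at position p is pvMajB.
def pvMatch (w s : String) (pos : Int) (i : Nat) : Bool :=
  (List.range i).all (fun j => PySem.Str.pyGet? s (pos + j) == PySem.Str.pyGet? w (pos + j))

def pvSurv (data : List String) (w : String) (pos : Int) (i : Nat) : List String :=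
  data.filter (fun s => pvMatch w s pos i)

def pvMajB (cur : List String) (p : Int) : Char :=
  if 2 * cur.countP (fun s => PySem.Str.pyGet? s p == some '1') ≥ cur.length then '1' else '0'

-- Pre_ = EXACTLY the inputs on which Python A returns, stated as a certificate: some
-- string w of data and some step count k ≥ 1 such that at each of the k steps every
-- survivor has a character at the current position (else A raises IndexError), w carries
-- that step's majority/tie bit, after k steps exactly one survivor remains, and w parses
-- in base 2 (else A raises ValueError); on every input with no such certificate A raises
-- IndexError, ValueError or RecursionError (the recursion never reaches a singleton).
-- The bound on k is harmless: every accessed position is a valid index of w, so a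
-- returning run takes at most 2 * (max string length) steps.
def Pre_filterdata_ox (data : List String) (pos : Int) : Prop :=
  ∃ w ∈ data, ∃ k < 2 * (data.map (fun s => s.toList.length)).foldl max 0 + 2,
    1 ≤ k ∧
    (∀ i < k,
      (∀ s ∈ pvSurv data w pos i, (PySem.Str.pyGet? s (pos + i)).isSome = true) ∧
      PySem.Str.pyGet? w (pos + i) = some (pvMajB (pvSurv data w pos i) (pos + i))) ∧
    (pvSurv data w pos k).length = 1 ∧
    (PySem.Int.ofStrBase? w 2).isSome = true

instance (data : List String) (pos : Int) : Decidable (Pre_filterdata_ox data pos) := by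
  unfold Pre_filterdata_ox; infer_instance

def pvWitness_filterdata_ox : List String × Int := (["10", "01", "11"], 0)

def Spec_filterdata_ox (data : List String) (pos : Int) (out : Int) : Prop := out = filterdata_ox_alt data pos
instance (data : List String) (pos : Int) (out : Int) : Decidable (Spec_filterdata_ox data pos out) := by unfold Spec_filterdata_ox; infer_instance

-- ===== CLAIM (what is proved, stated in full; the proofs are below) =====
def Claim_equal_filterdata_ox : Prop := ∀ (data : List String) (pos : Int), Dom_filterdata_ox data pos → Pre_filterdata_ox data pos → Spec_filterdata_ox data pos (filterdata_ox data pos)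

-- ===== LEMMAS AND PROOFS =====

-- B's one step at a position: the kept (majority/tie) bit and the strings carrying it.
def pvKeepBit (cur : List String) (p : Int) : Char :=
  if 2 * ((cur.countP (fun n => PySem.Str.pyGet? n p == some '1') : Nat) : Int) ≥ (cur.length : Int) then '1' else '0'

def pvStep (cur : List String) (p : Int) : List String :=
  cur.filter (fun n => PySem.Str.pyGet? n p == some (pvKeepBit cur p))

lemma pv_count_eq (cur : List String) (p : Int) :
    cur.foldl (fun acc n => if PySem.Str.pyGet? n p == some '1' then acc + 1 else acc) (0 : Int)
      = (cur.countP (fun n => PySem.Str.pyGet? n p == some '1') : Nat) := by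
  rw [PySem.List.foldl_count_if]; simp

-- A's rebuilt list equals B's single filter.
lemma pv_stepA_eq (cur : List String) (p : Int) (oc zc : Int)
    (hoc : oc = (cur.countP (fun n => PySem.Str.pyGet? n p == some '1') : Nat))
    (hzc : zc = (cur.length : Int) - oc) :
    cur.foldl (fun acc n =>
        if (decide (oc ≥ zc) && PySem.Str.pyGet? n p == some '1')
            || (decide (oc < zc) && PySem.Str.pyGet? n p == some '0')
        then acc ++ [n] else acc) [] = pvStep cur p := by
  rw [PySem.List.foldl_append_if_eq_filter]
  simp only [pvStep, pvKeepBit, List.nil_append]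
  have hlen : (cur.countP (fun n => PySem.Str.pyGet? n p == some '1') : Int) ≤ (cur.length : Int) := by
    exact_mod_cast List.countP_le_length (l := cur) (p := fun n => PySem.Str.pyGet? n p == some '1')
  by_cases h : oc ≥ zc
  · have h2 : (cur.length : Int) ≤ 2 * ((cur.countP (fun n => PySem.Str.pyGet? n p == some '1') : Nat) : Int) := by omega
    rw [if_pos h2]
    congr 1; funext n
    simp [h, not_lt.mpr h]
  · have h2 : ¬ ((cur.length : Int) ≤ 2 * ((cur.countP (fun n => PySem.Str.pyGet? n p == some '1') : Nat) : Int)) := by omega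
    rw [if_neg h2]
    congr 1; funext n
    simp [h, lt_of_not_ge h]

lemma pv_str_eq_list (s : String) (p : Int) :
    PySem.Str.pyGet? s p = PySem.List.pyGet? s.toList p := by
  simp [PySem.Str.pyGet?]

lemma pv_recA_succ (fuel : Nat) (cur : List String) (p : Int) :
    filterdata_ox_rec (fuel + 1) cur p =
      if (pvStep cur p).length == 1 then (PySem.Int.ofStrBase? ((pvStep cur p).headD "") 2).getD 0
      else filterdata_ox_rec fuel (pvStep cur p) (p + 1) := by
  rw [filterdata_ox_rec.eq_2]
  rw [pv_stepA_eq cur p _ _ (pv_count_eq cur p) rfl]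

lemma pv_recB_succ (fuel : Nat) (cur : List String) (p : Int) :
    filterdata_ox_alt_loop (fuel + 1) cur p =
      if cur.length == 1 then (PySem.Int.ofStrBase? (cur.headD "") 2).getD 0
      else filterdata_ox_alt_loop fuel (pvStep cur p) (p + 1) := by
  rw [filterdata_ox_alt_loop.eq_2]; rfl

-- A and B walk the same states; B lags one fuel unit behind A.
lemma pv_main (fuel : Nat) : ∀ (cur : List String) (p : Int),
    (cur.length ≠ 1 ∨ pvStep cur p = cur) →
    filterdata_ox_rec (fuel + 1) cur p = filterdata_ox_alt_loop (fuel + 2) cur p := by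
  induction fuel with
  | zero =>
    intro cur p h
    rw [pv_recA_succ, pv_recB_succ]
    by_cases h1 : cur.length = 1
    · have hstep : pvStep cur p = cur := by
        rcases h with h | h
        · exact absurd h1 h
        · exact h
      rw [hstep, if_pos (by simpa using h1), if_pos (by simpa using h1)]
    · rw [if_neg (c := (cur.length == 1) = true) (by simpa using h1)]
      by_cases hs : (pvStep cur p).length = 1
      · rw [if_pos (by simpa using hs), pv_recB_succ, if_pos (by simpa using hs)]
      · rw [if_neg (c := ((pvStep cur p).length == 1) = true) (by simpa using hs),
          pv_recB_succ, if_neg (c := ((pvStep cur p).length == 1) = true) (by simpa using hs)]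
        rfl
  | succ n ih =>
    intro cur p h
    rw [pv_recA_succ, pv_recB_succ]
    by_cases h1 : cur.length = 1
    · have hstep : pvStep cur p = cur := by
        rcases h with h | h
        · exact absurd h1 h
        · exact h
      rw [hstep, if_pos (by simpa using h1), if_pos (by simpa using h1)]
    · rw [if_neg (c := (cur.length == 1) = true) (by simpa using h1)]
      by_cases hs : (pvStep cur p).length = 1
      · rw [if_pos (by simpa using hs), pv_recB_succ, if_pos (by simpa using hs)]
      · rw [if_neg (c := ((pvStep cur p).length == 1) = true) (by simpa using hs)]
        exact ih (pvStep cur p) (p + 1) (Or.inl hs)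

-- On singleton data the certificate's first step forces the single string to carry
-- its own majority bit, so B's step keeps it unchanged.
lemma pv_singleton_fixed (s : String) (pos : Int)
    (hmaj : PySem.Str.pyGet? s pos = some (pvMajB [s] pos)) :
    pvStep [s] pos = [s] := by
  by_cases c : PySem.List.pyGet? s.toList pos = some '1'
  · simp [pvStep, pvKeepBit, c]
  · have hz : pvMajB [s] pos = '0' := by
      simp [pvMajB, List.countP, List.countP.go, Bool.cond_eq_ite, beq_iff_eq, c]
    rw [hz, pv_str_eq_list] at hmaj
    simp [pvStep, pvKeepBit, List.countP, List.countP.go, hmaj]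

-- ===== VERDICT (by name: the statement is the Claim_ definition above) =====
theorem filterdata_ox_spec : Claim_equal_filterdata_ox := by
  intro data pos _ hpre
  unfold Spec_filterdata_ox filterdata_ox filterdata_ox_alt
  apply pv_main
  by_cases h1 : data.length = 1
  · right
    obtain ⟨s, rfl⟩ := List.length_eq_one_iff.mp h1
    obtain ⟨w, hw, k, _, hk1, hsteps, _, _⟩ := hpre
    have hws : w = s := by simpa using hw
    subst hws
    have h0 := (hsteps 0 (by omega)).2
    have hsurv0 : pvSurv [w] w pos 0 = [w] := by
      simp [pvSurv, pvMatch]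
    rw [hsurv0] at h0
    simp only [Nat.cast_zero, add_zero] at h0
    exact pv_singleton_fixed w pos h0
  · exact Or.inl h1
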